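-- pv_equiv track=rewrite | github.com/lukerabbitte/decision_transformer_rec | load_data.py | get_terminal_indices
-- ===== SOURCE A (Python) =====
-- def get_terminal_indices(arr):
--     idxs = {}
--     for i in reversed(range(len(arr))):
--         idxs[arr[i]] = i
--     done_idxs = list(idxs.values())
--     done_idxs.reverse()
--     done_idxs = done_idxs[1:]
--     done_idxs.append(len(arr))
--     return done_idxs
-- ===== SOURCE B (Python) =====
-- def get_terminal_indices(arr):
--     # Two explicit maps built in one forward pass, then an explicit sort:
--     # first[v] = index of v's first occurrence, last[v] = index of its last.
--     # The distinct values sorted by last occurrence give the segment order.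
--     first, last = {}, {}
--     for i, v in enumerate(arr):
--         first.setdefault(v, i)
--         last[v] = i
--     firsts = [first[v] for v in sorted(last, key=last.get)]
--     return firsts[1:] + [len(arr)]
-- ===== Notes on version B (the rewrite author's own statement) =====
-- stated objective: alternative
-- what changed: Replaces A's reverse iteration with its dict insertion-order/overwrite trick by a forward pass building two explicit maps (first- and last-occurrence index per value) and then an explicit sort of the distinct values by last occurrence.
import Mathlib
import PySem

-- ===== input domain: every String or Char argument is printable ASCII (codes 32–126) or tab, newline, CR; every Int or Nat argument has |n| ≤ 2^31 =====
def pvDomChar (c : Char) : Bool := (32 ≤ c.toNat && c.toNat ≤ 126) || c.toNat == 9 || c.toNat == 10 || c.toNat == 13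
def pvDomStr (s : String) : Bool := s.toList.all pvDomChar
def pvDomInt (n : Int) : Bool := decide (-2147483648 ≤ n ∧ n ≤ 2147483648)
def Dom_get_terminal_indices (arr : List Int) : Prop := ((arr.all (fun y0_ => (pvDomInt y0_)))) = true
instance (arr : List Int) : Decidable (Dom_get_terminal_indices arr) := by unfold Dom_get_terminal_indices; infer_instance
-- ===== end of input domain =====

-- B replaces A's reverse pass with its dict insertion-order trick by two explicit maps
-- (first and last occurrence index) built in one forward pass, then an explicit sort of
-- the distinct values by last occurrence; objective: alternative.

-- ===== PORT A =====
def get_terminal_indices (arr : List Int) : List Int :=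
  let idxs : PySem.Dict Int Int :=
    ((PySem.List.pyRange 0 (PySem.List.len arr) 1).reverse).foldl
      (fun d i => d.insert (PySem.List.pyGetD arr i 0) i) PySem.Dict.empty
      -- arr[i]: i always in range here, so pyGetD's default is only a totality guard
  let done_idxs := idxs.values
  let done_idxs := done_idxs.reverse
  let done_idxs := PySem.List.slice done_idxs (some 1) none
  done_idxs ++ [PySem.List.len arr]

-- ===== PORT B =====
def get_terminal_indices_alt (arr : List Int) : List Int :=
  let fl := (PySem.List.enumerate arr 0).foldl
      (fun p q => (p.1.setdefault q.2 q.1, p.2.insert q.2 q.1))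
      ((PySem.Dict.empty : PySem.Dict Int Int), (PySem.Dict.empty : PySem.Dict Int Int))
  -- first[v] in the comprehension: v is always a key of first, so getD's default never fires
  let firsts := (PySem.List.sorted fl.2.keys (fun v => fl.2.getD v 0) false).map
      (fun v => fl.1.getD v 0)
  PySem.List.slice firsts (some 1) none ++ [PySem.List.len arr]

-- ===== PRECONDITION & SPEC =====
def Spec_get_terminal_indices (arr : List Int) (out : List Int) : Prop := out = get_terminal_indices_alt arr
instance (arr : List Int) (out : List Int) : Decidable (Spec_get_terminal_indices arr out) := by unfold Spec_get_terminal_indices; infer_instance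

-- ===== CLAIM =====
def Claim_equal_get_terminal_indices : Prop := ∀ (arr : List Int), Dom_get_terminal_indices arr → Spec_get_terminal_indices arr (get_terminal_indices arr)

-- ===== LEMMAS AND PROOFS =====

-- index of v's first occurrence in the list (meaningful only for members)
def pvFirst : List Int → Int → Int
  | [], _ => 0
  | a :: l, v => if v = a then 0 else pvFirst l v + 1

-- index of v's last occurrence in the list (meaningful only for members)
def pvLast : List Int → Int → Int
  | [], _ => 0
  | _ :: l, v => if v ∈ l then pvLast l v + 1 else 0

theorem pvLast_nonneg (l : List Int) (v : Int) : 0 ≤ pvLast l v := by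
  induction l with
  | nil => simp [pvLast]
  | cons a l ih =>
    simp only [pvLast]
    split <;> omega

theorem pvDedup_cons_reverse (x : Int) (xs : List Int) :
    PySem.List.dedup (x :: xs).reverse = PySem.Set.add (PySem.List.dedup xs.reverse) x := by
  simp [PySem.List.dedup_eq_ofList, PySem.Set.ofList_append_singleton]

-- A's dict after the reversed loop: keys in last-occurrence-descending order, values = first index
theorem pvA_items (xs : List Int) : ∀ (k : Int),
    (((PySem.List.enumerate xs k).reverse).foldl (fun d q => d.insert q.2 q.1)
        (PySem.Dict.empty : PySem.Dict Int Int)).items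
      = (PySem.List.dedup xs.reverse).map (fun v => (v, k + pvFirst xs v)) := by
  induction xs with
  | nil => intro k; rfl
  | cons x xs ih =>
    intro k
    rw [PySem.List.enumerate_cons, List.reverse_cons, List.foldl_append, List.foldl_cons,
      List.foldl_nil]
    set D := ((PySem.List.enumerate xs (k+1)).reverse).foldl (fun d q => d.insert q.2 q.1)
        (PySem.Dict.empty : PySem.Dict Int Int) with hD
    have hkeys : D.keys = PySem.List.dedup xs.reverse := by
      unfold PySem.Dict.keys
      rw [ih (k + 1), List.map_map]
      simp [Function.comp_def]
    rw [pvDedup_cons_reverse]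
    by_cases hx : x ∈ xs
    · have hmem : x ∈ PySem.List.dedup xs.reverse := by
        simp [PySem.List.dedup_eq_ofList, PySem.Set.mem_ofList, hx]
      have hc : D.contains x = true := (PySem.Dict.contains_iff_mem_keys D x).mpr (hkeys ▸ hmem)
      rw [PySem.Dict.items_insert_of_contains D k hc, ih (k + 1), List.map_map,
        PySem.Set.add_of_mem hmem]
      apply List.map_congr_left
      intro v hv
      by_cases hvx : v = x
      · subst hvx
        simp [pvFirst]
      · simp only [Function.comp_apply, beq_iff_eq, hvx, if_false]
        simp only [pvFirst, hvx, if_false]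
        rw [show k + 1 + pvFirst xs v = k + (pvFirst xs v + 1) from by ring]
    · have hmem : x ∉ PySem.List.dedup xs.reverse := by
        simp [PySem.List.dedup_eq_ofList, PySem.Set.mem_ofList, hx]
      have hc : D.contains x = false := by
        rw [← Bool.not_eq_true, PySem.Dict.contains_iff_mem_keys D x, hkeys]
        exact hmem
      rw [PySem.Dict.items_insert_of_not_contains D k hc, ih (k + 1),
        PySem.Set.add_of_not_mem hmem, List.map_append]
      congr 1
      · apply List.map_congr_left
        intro v hv
        have hvxs : v ∈ xs := by
          simpa [PySem.List.dedup_eq_ofList, PySem.Set.mem_ofList] using hv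
        have hvx : v ≠ x := fun h => hx (h ▸ hvxs)
        simp only [pvFirst, hvx, if_false]
        ring_nf
      · simp [pvFirst]

theorem pvL_getD_not_mem (xs : List Int) : ∀ (k : Int) (d : PySem.Dict Int Int) (v : Int),
    v ∉ xs →
    ((PySem.List.enumerate xs k).foldl (fun d q => d.insert q.2 q.1) d).getD v 0 = d.getD v 0 := by
  induction xs with
  | nil => intro k d v _; rfl
  | cons x xs ih =>
    intro k d v hv
    rw [PySem.List.enumerate_cons, List.foldl_cons]
    rw [ih (k+1) _ v (fun h => hv (List.mem_cons_of_mem _ h))]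
    exact PySem.Dict.getD_insert_of_ne d k 0 (fun h => hv (h ▸ List.mem_cons_self))

theorem pvL_getD (xs : List Int) : ∀ (k : Int) (d : PySem.Dict Int Int) (v : Int),
    v ∈ xs →
    ((PySem.List.enumerate xs k).foldl (fun d q => d.insert q.2 q.1) d).getD v 0
      = k + pvLast xs v := by
  induction xs with
  | nil => intro k d v hv; cases hv
  | cons x xs ih =>
    intro k d v hv
    rw [PySem.List.enumerate_cons, List.foldl_cons]
    by_cases hvx : v ∈ xs
    · rw [ih (k+1) _ v hvx]
      simp only [pvLast, hvx, if_pos]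
      ring
    · have hvx' : v = x := by
        rcases List.mem_cons.mp hv with h | h
        · exact h
        · exact absurd h hvx
      subst hvx'
      rw [pvL_getD_not_mem xs (k+1) _ v hvx, PySem.Dict.getD_insert_self]
      simp [pvLast, hvx]

theorem pvF_getD_contains (xs : List Int) : ∀ (k : Int) (d : PySem.Dict Int Int) (v : Int),
    d.contains v = true →
    ((PySem.List.enumerate xs k).foldl (fun d q => d.setdefault q.2 q.1) d).getD v 0
      = d.getD v 0 := by
  induction xs with
  | nil => intro k d v _; rfl
  | cons x xs ih =>
    intro k d v hc
    rw [PySem.List.enumerate_cons, List.foldl_cons]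
    have hc' : (d.setdefault x k).contains v = true := by
      rw [PySem.Dict.contains_setdefault]; simp [hc]
    rw [ih (k+1) _ v hc']
    by_cases hvx : v = x
    · subst hvx
      rw [PySem.Dict.setdefault_of_contains d k hc]
    · rw [PySem.Dict.getD_eq_get?_getD, PySem.Dict.get?_setdefault_of_ne d k hvx,
        ← PySem.Dict.getD_eq_get?_getD]

theorem pvF_getD (xs : List Int) : ∀ (k : Int) (d : PySem.Dict Int Int) (v : Int),
    v ∈ xs → d.contains v = false →
    ((PySem.List.enumerate xs k).foldl (fun d q => d.setdefault q.2 q.1) d).getD v 0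
      = k + pvFirst xs v := by
  induction xs with
  | nil => intro k d v hv _; cases hv
  | cons x xs ih =>
    intro k d v hv hc
    rw [PySem.List.enumerate_cons, List.foldl_cons]
    by_cases hvx : v = x
    · subst hvx
      rw [PySem.Dict.setdefault_of_not_contains d k hc]
      rw [pvF_getD_contains xs (k+1) _ v (PySem.Dict.contains_insert_self d v k),
        PySem.Dict.getD_insert_self]
      simp [pvFirst]
    · have hv' : v ∈ xs := by
        rcases List.mem_cons.mp hv with h | h
        · exact absurd h hvx
        · exact h
      have hc' : (d.setdefault x k).contains v = false := by
        rw [PySem.Dict.contains_setdefault]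
        simp [hvx, hc]
      rw [ih (k+1) _ v hv' hc']
      simp only [pvFirst, hvx, if_false]
      ring
  
-- the distinct values in last-occurrence-ascending order are strictly increasing under pvLast
theorem pvPairwise (xs : List Int) :
    ((PySem.List.dedup xs.reverse).reverse).Pairwise (fun a b => pvLast xs a < pvLast xs b) := by
  induction xs with
  | nil => simp [PySem.List.dedup]
  | cons x xs ih =>
    rw [pvDedup_cons_reverse]
    by_cases hx : x ∈ xs
    · rw [PySem.Set.add_of_mem (by simp [PySem.List.dedup_eq_ofList, PySem.Set.mem_ofList, hx])]
      refine ih.imp_of_mem ?_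
      intro a b ha hb hab
      have ha' : a ∈ xs := by
        simpa [PySem.List.dedup_eq_ofList, PySem.Set.mem_ofList] using List.mem_reverse.mp ha
      have hb' : b ∈ xs := by
        simpa [PySem.List.dedup_eq_ofList, PySem.Set.mem_ofList] using List.mem_reverse.mp hb
      simp only [pvLast, ha', hb', if_pos]
      omega
    · rw [PySem.Set.add_of_not_mem
        (by simp [PySem.List.dedup_eq_ofList, PySem.Set.mem_ofList, hx])]
      rw [List.reverse_append]
      simp only [List.reverse_cons, List.reverse_nil, List.nil_append, List.cons_append,
        List.pairwise_cons]
      constructor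
      · intro b hb
        have hb' : b ∈ xs := by
          simpa [PySem.List.dedup_eq_ofList, PySem.Set.mem_ofList] using List.mem_reverse.mp hb
        have := pvLast_nonneg xs b
        simp only [pvLast, hx, hb', if_pos, if_false]
        omega
      · refine ih.imp_of_mem ?_
        intro a b ha hb hab
        have ha' : a ∈ xs := by
          simpa [PySem.List.dedup_eq_ofList, PySem.Set.mem_ofList] using List.mem_reverse.mp ha
        have hb' : b ∈ xs := by
          simpa [PySem.List.dedup_eq_ofList, PySem.Set.mem_ofList] using List.mem_reverse.mp hb
        simp only [pvLast, ha', hb', if_pos]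
        omega

-- ===== VERDICT =====
theorem get_terminal_indices_spec : Claim_equal_get_terminal_indices := by
  intro arr _
  unfold Spec_get_terminal_indices
  have hAfold : ((PySem.List.pyRange 0 (PySem.List.len arr) 1).reverse).foldl
      (fun d i => d.insert (PySem.List.pyGetD arr i 0) i) (PySem.Dict.empty : PySem.Dict Int Int)
      = ((PySem.List.enumerate arr 0).reverse).foldl (fun d q => d.insert q.2 q.1)
        (PySem.Dict.empty : PySem.Dict Int Int) := by
    rw [show PySem.List.enumerate arr 0 = PySem.List.enumerate arr from rfl,
      PySem.List.enumerate_eq_map_pyRange arr 0, ← List.map_reverse, List.foldl_map]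
  set L := (PySem.List.enumerate arr 0).foldl (fun d q => d.insert q.2 q.1)
      (PySem.Dict.empty : PySem.Dict Int Int) with hL
  set F := (PySem.List.enumerate arr 0).foldl (fun d q => d.setdefault q.2 q.1)
      (PySem.Dict.empty : PySem.Dict Int Int) with hF
  have hBpair : (PySem.List.enumerate arr 0).foldl
      (fun p q => (p.1.setdefault q.2 q.1, p.2.insert q.2 q.1))
      ((PySem.Dict.empty : PySem.Dict Int Int), (PySem.Dict.empty : PySem.Dict Int Int))
      = (F, L) := by
    exact PySem.List.foldl_prod_mk
      (fun (d : PySem.Dict Int Int) (q : Int × Int) => d.setdefault q.2 q.1)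
      (fun (d : PySem.Dict Int Int) (q : Int × Int) => d.insert q.2 q.1)
      (PySem.List.enumerate arr 0) PySem.Dict.empty PySem.Dict.empty
  set D := (PySem.List.dedup arr.reverse).reverse with hDdef
  have hAvals : (((PySem.List.enumerate arr 0).reverse).foldl (fun d q => d.insert q.2 q.1)
      (PySem.Dict.empty : PySem.Dict Int Int)).values.reverse
      = D.map (fun v => pvFirst arr v) := by
    unfold PySem.Dict.values
    rw [pvA_items arr 0, List.map_map, ← List.map_reverse]
    apply List.map_congr_left
    intro v _
    simp
  have hkeysL : L.keys = PySem.Set.ofList arr := by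
    rw [hL, PySem.Dict.keys_foldl_insert_key (PySem.List.enumerate arr 0)
      (fun q => q.2) (fun _ q => q.1) PySem.Dict.empty]
    rw [PySem.Dict.keys_empty, PySem.List.map_snd_enumerate, PySem.Set.update_nil_left]
  have hndD : D.Nodup := by
    rw [hDdef, List.nodup_reverse, PySem.List.dedup_eq_ofList]
    exact PySem.Set.nodup_ofList _
  have hmemD : ∀ a : Int, a ∈ D ↔ a ∈ arr := by
    intro a
    rw [hDdef, List.mem_reverse, PySem.List.dedup_eq_ofList, PySem.Set.mem_ofList,
      List.mem_reverse]
  have hsorted : PySem.List.sorted L.keys (fun v => L.getD v 0) false = D := by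
    apply PySem.List.sorted_eq_of_perm_of_pairwise_lt
    · rw [hkeysL]
      exact (List.perm_ext_iff_of_nodup hndD (PySem.Set.nodup_ofList arr)).mpr
        (fun a => by rw [hmemD a, PySem.Set.mem_ofList])
    · refine (pvPairwise arr).imp_of_mem ?_
      intro a b ha hb hab
      have ha' : a ∈ arr := (hmemD a).mp ha
      have hb' : b ∈ arr := (hmemD b).mp hb
      rw [hL, pvL_getD arr 0 _ a ha', pvL_getD arr 0 _ b hb']
      omega
  have hfirsts : D.map (fun v => F.getD v 0) = D.map (fun v => pvFirst arr v) := by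
    apply List.map_congr_left
    intro v hv
    rw [hF, pvF_getD arr 0 _ v ((hmemD v).mp hv) (PySem.Dict.contains_empty v)]
    ring
  simp only [get_terminal_indices, get_terminal_indices_alt]
  rw [hAfold, hBpair, hAvals]
  show _ = PySem.List.slice ((PySem.List.sorted L.keys (fun v => L.getD v 0) false).map
      (fun v => F.getD v 0)) (some 1) none ++ [PySem.List.len arr]
  rw [hsorted, hfirsts]
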